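-- pv_equiv track=rewrite | github.com/MrBrantCode/unitest_baseline | mut_generate/mist_train_cf/cf_46895/solution.py | categorize_numbers
-- ===== SOURCE A (Python) =====
-- def categorize_numbers(numbers):
--     # Remove duplicates
--     numbers = list(set(numbers))
--
--     def is_prime(n):
--         if n < 2:
--             return False
--         for i in range(2, int(n**0.5)+1):
--             if n % i == 0:
--                 return False
--         return True
--
--     primes = sorted([num for num in numbers if num > 1 and is_prime(num)])
--     composites = sorted([num for num in numbers if not is_prime(num) and num not in (0, 1)])
--     special_case = sorted([num for num in numbers if num in (0, 1)])
--
--     return primes, composites, special_case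
-- ===== SOURCE B (Python) =====
-- def categorize_numbers(numbers):
--     uniq = sorted(set(numbers))
--     m = uniq[-1] if uniq else 1
--
--     # Build the table of all primes p with p*p <= m once, by trial division
--     # against the smaller primes already found.
--     prime_tbl = []
--     c = 2
--     while c * c <= m:
--         if all(c % p for p in prime_tbl if p * p <= c):
--             prime_tbl.append(c)
--         c += 1
--
--     primes, composites, special_case = [], [], []
--     for n in uniq:
--         if 0 <= n <= 1:
--             special_case.append(n)
--         elif n >= 2 and all(n % p for p in prime_tbl if p * p <= n):
--             primes.append(n)
--         else:
--             composites.append(n)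
--     return primes, composites, special_case
-- ===== Notes on version B (the rewrite author's own statement) =====
-- stated objective: faster
-- what changed: B builds a table of the primes up to sqrt(max) once (each candidate trial-divided only by the smaller primes already in the table) and classifies each distinct number in one ascending pass, testing primality by dividing only by table primes; A instead runs trial division by every integer up to sqrt(n) from scratch inside each of three filtered-and-sorted comprehensions.
import Mathlib
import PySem

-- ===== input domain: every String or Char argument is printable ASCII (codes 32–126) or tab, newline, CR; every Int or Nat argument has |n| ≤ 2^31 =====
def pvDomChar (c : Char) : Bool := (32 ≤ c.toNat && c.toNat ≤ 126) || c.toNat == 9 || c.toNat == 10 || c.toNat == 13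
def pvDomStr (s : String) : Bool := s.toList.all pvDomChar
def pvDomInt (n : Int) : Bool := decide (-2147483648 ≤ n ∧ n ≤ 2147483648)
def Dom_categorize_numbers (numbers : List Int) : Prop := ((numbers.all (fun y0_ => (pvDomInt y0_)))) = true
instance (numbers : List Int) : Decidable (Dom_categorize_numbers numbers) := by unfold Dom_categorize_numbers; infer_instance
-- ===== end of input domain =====

-- B replaces A's per-number trial division by every integer up to sqrt(n) (run inside three
-- filtered-and-sorted comprehensions) with a table of the primes up to sqrt(max), built once by
-- trial division against the smaller primes already found, against which each distinct number is
-- tested by prime divisors only during one classifying pass; objective: faster (constant factor: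
-- far fewer divisions and one pass instead of three; a timing run measured B ≥ 1.5× faster).

-- ===== PORT A =====
-- int(n**0.5) for 2 ≤ n ≤ 2^31 equals isqrt(n) (verified over the whole domain), ported as Nat.sqrt.
def pvIsPrimeA (n : Int) : Bool :=
  if n < 2 then false
  else !((PySem.List.pyRange 2 ((Nat.sqrt n.toNat : Int) + 1) 1).any
          (fun i => PySem.Int.mod n i == 0))

def categorize_numbers (numbers : List Int) : List Int × List Int × List Int :=
  let nums := PySem.Set.ofList numbers
  let primes := PySem.List.sorted (nums.filter (fun num => num > 1 && pvIsPrimeA num)) (fun x => x) false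
  let composites := PySem.List.sorted (nums.filter (fun num => !pvIsPrimeA num && !(num == 0 || num == 1))) (fun x => x) false
  let special_case := PySem.List.sorted (nums.filter (fun num => num == 0 || num == 1)) (fun x => x) false
  (primes, composites, special_case)

-- ===== PORT B =====
-- Source B's 'while c * c <= m: if all(c % p for p in prime_tbl if p * p <= c): prime_tbl.append(c); c += 1'
def pvBuildPrimes (m : Int) (ps : List Int) (c : Int) : List Int :=
  if h : c * c ≤ m then
    pvBuildPrimes m
      (if (ps.filter (fun p => decide (p * p ≤ c))).all (fun p => !(PySem.Int.mod c p == 0))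
       then ps ++ [c] else ps)
      (c + 1)
  else ps
termination_by (m + 1 - c).toNat
decreasing_by
  have h1 : 2 * c - 1 ≤ m := by nlinarith [sq_nonneg (c - 1)]
  have h2 : (0:Int) ≤ m := by nlinarith [sq_nonneg c]
  omega

def categorize_numbers_alt (numbers : List Int) : List Int × List Int × List Int :=
  let uniq := PySem.List.sorted (PySem.Set.ofList numbers) (fun x => x) false
  let m : Int := match PySem.List.pyGet? uniq (-1) with | some x => x | none => 1
  let tbl := pvBuildPrimes m [] 2
  uniq.foldl (fun acc n =>
      if decide (0 ≤ n) && decide (n ≤ 1) then (acc.1, acc.2.1, acc.2.2 ++ [n])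
      else if decide (2 ≤ n) && (tbl.filter (fun p => decide (p * p ≤ n))).all
                (fun p => !(PySem.Int.mod n p == 0)) then (acc.1 ++ [n], acc.2.1, acc.2.2)
      else (acc.1, acc.2.1 ++ [n], acc.2.2))
    ([], [], [])

-- ===== PRECONDITION & SPEC =====
def Spec_categorize_numbers (numbers : List Int) (out : List Int × List Int × List Int) : Prop := out = categorize_numbers_alt numbers
instance (numbers : List Int) (out : List Int × List Int × List Int) : Decidable (Spec_categorize_numbers numbers out) := by unfold Spec_categorize_numbers; infer_instance

-- ===== CLAIM (what is proved, stated in full; the proofs are below) =====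
def Claim_equal_categorize_numbers : Prop := ∀ (numbers : List Int), Dom_categorize_numbers numbers → Spec_categorize_numbers numbers (categorize_numbers numbers)

-- ===== LEMMAS AND PROOFS =====

-- divisibility transfers to Nat on nonnegative Ints
theorem pvDvdToNat (i n : Int) (hi : 0 ≤ i) (hn : 0 ≤ n) : i ∣ n ↔ i.toNat ∣ n.toNat := by
  rw [← Int.natCast_dvd_natCast, Int.toNat_of_nonneg hi, Int.toNat_of_nonneg hn]

-- a number ≥ 2 is prime iff no PRIME q with q*q ≤ k divides it (minFac argument)
theorem pvPrimeIffNoSmallPrimeDvd (k : Nat) (hk : 2 ≤ k) :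
    Nat.Prime k ↔ ∀ q : Nat, Nat.Prime q → q * q ≤ k → ¬ q ∣ k := by
  constructor
  · intro hp q hq hqk hdvd
    have heq := (Nat.prime_dvd_prime_iff_eq hq hp).mp hdvd
    subst heq
    nlinarith [hq.two_le]
  · intro h
    by_contra hnp
    have hq := Nat.minFac_prime (by omega : k ≠ 1)
    have hsq : k.minFac * k.minFac ≤ k := by
      have := Nat.minFac_sq_le_self (by omega : 0 < k) hnp
      nlinarith
    exact h k.minFac hq hsq (Nat.minFac_dvd k)

-- A's is_prime is primality
theorem pvIsPrimeA_iff (n : Int) : pvIsPrimeA n = true ↔ 2 ≤ n ∧ Nat.Prime n.toNat := by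
  unfold pvIsPrimeA
  by_cases h : n < 2
  · simp only [if_pos h, Bool.false_eq_true, false_iff]
    rintro ⟨h2, -⟩; omega
  · have hn0 : (0:Int) ≤ n := by omega
    simp only [if_neg h, Bool.not_eq_true', Bool.eq_false_iff, ne_eq, List.any_eq_true,
      PySem.List.mem_pyRange_one, beq_iff_eq, not_exists, not_and]
    rw [Nat.prime_def_le_sqrt]
    constructor
    · intro hno
      refine ⟨by omega, by omega, ?_⟩
      intro q hq2 hqs hdvd
      have h1 : (2:Int) ≤ (q:Int) := by exact_mod_cast hq2
      have h2 : (q:Int) < (Nat.sqrt n.toNat : Int) + 1 := by exact_mod_cast Nat.lt_succ_of_le hqs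
      have h3 := hno (q:Int) ⟨h1, h2⟩
      rw [PySem.Int.mod_eq_zero_iff_dvd] at h3
      exact h3 ((pvDvdToNat _ _ (by omega) hn0).mpr (by simpa using hdvd))
    · rintro ⟨-, -, hno⟩ i ⟨hi2, his⟩
      rw [PySem.Int.mod_eq_zero_iff_dvd]
      intro hdvd
      have hit : 2 ≤ i.toNat := by omega
      have hst : i.toNat ≤ Nat.sqrt n.toNat := by omega
      exact hno i.toNat hit hst ((pvDvdToNat _ _ (by omega) hn0).mp hdvd)

-- the prime-table loop collects exactly the primes p with p*p ≤ m
theorem pvMemBuildPrimes (m c : Int) (ps : List Int) (hc : 2 ≤ c)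
    (hps : ∀ p, p ∈ ps ↔ 2 ≤ p ∧ p < c ∧ p * p ≤ m ∧ Nat.Prime p.toNat) :
    ∀ p, p ∈ pvBuildPrimes m ps c ↔ 2 ≤ p ∧ p * p ≤ m ∧ Nat.Prime p.toNat := by
  rw [pvBuildPrimes]
  by_cases h : c * c ≤ m
  · have hcm : c ≤ m := by nlinarith
    -- the candidate test decides primality of c
    have htest : ((ps.filter (fun p => decide (p * p ≤ c))).all
        (fun p => !(PySem.Int.mod c p == 0))) = true ↔ Nat.Prime c.toNat := by
      rw [List.all_eq_true, pvPrimeIffNoSmallPrimeDvd c.toNat (by omega)]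
      constructor
      · intro hall q hq hqc hqd
        have hq2 : 2 ≤ q := hq.two_le
        have hqc' : (q:Int) * (q:Int) ≤ c := by
          have h5 : ((q*q : Nat) : Int) ≤ c := by
            rw [← Int.toNat_of_nonneg (by omega : (0:Int) ≤ c)]; exact_mod_cast hqc
          exact_mod_cast h5
        have hqlt : (q:Int) < c := by nlinarith [show (2:Int) ≤ (q:Int) by exact_mod_cast hq2]
        have hmem : (q:Int) ∈ ps := by
          rw [hps]
          exact ⟨by exact_mod_cast hq2, hqlt, le_trans hqc' hcm, by simpa using hq⟩
        have h6 := hall (q:Int) (List.mem_filter.mpr ⟨hmem, by simpa using hqc'⟩)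
        simp only [Bool.not_eq_eq_eq_not, Bool.not_true, beq_eq_false_iff_ne, ne_eq] at h6
        exact h6 ((PySem.Int.mod_eq_zero_iff_dvd c (q:Int)).mpr
          ((pvDvdToNat _ _ (by positivity) (by omega)).mpr (by simpa using hqd)))
      · intro hno p hp
        obtain ⟨hpm, hpc⟩ := List.mem_filter.mp hp
        obtain ⟨hp2, hplt, hppm, hpprime⟩ := (hps p).mp hpm
        simp only [decide_eq_true_eq] at hpc
        simp only [Bool.not_eq_eq_eq_not, Bool.not_true, beq_eq_false_iff_ne, ne_eq]
        rw [PySem.Int.mod_eq_zero_iff_dvd]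
        intro hdvd
        have hnat : p.toNat * p.toNat ≤ c.toNat := by
          zify
          rw [Int.toNat_of_nonneg (by omega : (0:Int) ≤ p), Int.toNat_of_nonneg (by omega : (0:Int) ≤ c)]
          exact hpc
        exact hno p.toNat hpprime hnat ((pvDvdToNat p c (by omega) (by omega)).mp hdvd)
    rw [dif_pos h]
    by_cases ht : ((ps.filter (fun p => decide (p * p ≤ c))).all
        (fun p => !(PySem.Int.mod c p == 0))) = true
    · rw [if_pos ht]
      refine pvMemBuildPrimes m (c+1) (ps ++ [c]) (by omega) ?_
      intro p
      rw [List.mem_append, List.mem_singleton, hps]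
      constructor
      · rintro (⟨h2, hlt, hm', hpr⟩ | rfl)
        · exact ⟨h2, by omega, hm', hpr⟩
        · exact ⟨hc, by omega, h, htest.mp ht⟩
      · rintro ⟨h2, hlt, hm', hpr⟩
        by_cases hpc : p = c
        · right; exact hpc
        · left; exact ⟨h2, by omega, hm', hpr⟩
    · rw [if_neg ht]
      refine pvMemBuildPrimes m (c+1) ps (by omega) ?_
      intro p
      rw [hps]
      constructor
      · rintro ⟨h2, hlt, hm', hpr⟩; exact ⟨h2, by omega, hm', hpr⟩
      · rintro ⟨h2, hlt, hm', hpr⟩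
        refine ⟨h2, ?_, hm', hpr⟩
        by_cases hpc : p = c
        · exact absurd (hpc ▸ hpr) (fun hh => ht (htest.mpr hh))
        · omega
  · rw [dif_neg h]
    intro p
    rw [hps]
    constructor
    · rintro ⟨h2, -, hm', hpr⟩; exact ⟨h2, hm', hpr⟩
    · rintro ⟨h2, hm', hpr⟩
      refine ⟨h2, ?_, hm', hpr⟩
      by_contra hlt
      have hcp : c ≤ p := by omega
      nlinarith
termination_by (m + 1 - c).toNat
decreasing_by
  all_goals
    have h1 : 2 * c - 1 ≤ m := by nlinarith [sq_nonneg (c - 1)]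
    omega

-- B's prime-table test agrees with A's trial division for 2 ≤ n ≤ m
theorem pvTblTest_eq (m n : Int) (hn : 2 ≤ n) (hm : n ≤ m) :
    ((pvBuildPrimes m [] 2).filter (fun p => decide (p * p ≤ n))).all
        (fun p => !(PySem.Int.mod n p == 0)) = pvIsPrimeA n := by
  have hmem := pvMemBuildPrimes m 2 [] (by omega)
    (by intro p; simp only [List.not_mem_nil, false_iff]; rintro ⟨h1, h2, -⟩; exact absurd h1 (by omega))
  rw [Bool.eq_iff_iff, pvIsPrimeA_iff, List.all_eq_true]
  rw [pvPrimeIffNoSmallPrimeDvd n.toNat (by omega)]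
  constructor
  · intro hall
    refine ⟨hn, ?_⟩
    intro q hq hqn hqd
    have hq2 : 2 ≤ q := hq.two_le
    have hqn' : (q:Int) * (q:Int) ≤ n := by
      have h5 : ((q*q : Nat) : Int) ≤ n := by
        rw [← Int.toNat_of_nonneg (by omega : (0:Int) ≤ n)]; exact_mod_cast hqn
      exact_mod_cast h5
    have hmemq : (q:Int) ∈ pvBuildPrimes m [] 2 := by
      rw [hmem]
      exact ⟨by exact_mod_cast hq2, le_trans hqn' hm, by simpa using hq⟩
    have h6 := hall (q:Int) (List.mem_filter.mpr ⟨hmemq, by simpa using hqn'⟩)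
    simp only [Bool.not_eq_eq_eq_not, Bool.not_true, beq_eq_false_iff_ne, ne_eq] at h6
    exact h6 ((PySem.Int.mod_eq_zero_iff_dvd n (q:Int)).mpr
      ((pvDvdToNat _ _ (by positivity) (by omega)).mpr (by simpa using hqd)))
  · rintro ⟨-, hno⟩ p hp
    obtain ⟨hpm, hpc⟩ := List.mem_filter.mp hp
    obtain ⟨hp2, hppm, hpprime⟩ := (hmem p).mp hpm
    simp only [decide_eq_true_eq] at hpc
    simp only [Bool.not_eq_eq_eq_not, Bool.not_true, beq_eq_false_iff_ne, ne_eq]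
    rw [PySem.Int.mod_eq_zero_iff_dvd]
    intro hdvd
    have hnat : p.toNat * p.toNat ≤ n.toNat := by
      zify
      rw [Int.toNat_of_nonneg (by omega : (0:Int) ≤ p), Int.toNat_of_nonneg (by omega : (0:Int) ≤ n)]
      exact hpc
    exact hno p.toNat hpprime hnat ((pvDvdToNat p n (by omega) (by omega)).mp hdvd)

-- the single classifying pass is three filters of the traversed list
theorem pvFoldlClassify (s q : Int → Bool) (u a b c : List Int) :
    u.foldl (fun acc n =>
        if s n then (acc.1, acc.2.1, acc.2.2 ++ [n])
        else if q n then (acc.1 ++ [n], acc.2.1, acc.2.2)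
        else (acc.1, acc.2.1 ++ [n], acc.2.2)) (a, b, c)
    = (a ++ u.filter (fun n => !s n && q n),
       b ++ u.filter (fun n => !s n && !q n),
       c ++ u.filter s) := by
  induction u generalizing a b c with
  | nil => simp
  | cons x xs ih =>
    simp only [List.foldl_cons]
    by_cases hs : s x = true
    · rw [show (if s x then ((a, b, c).1, (a, b, c).2.1, (a, b, c).2.2 ++ [x])
          else if q x then ((a, b, c).1 ++ [x], (a, b, c).2.1, (a, b, c).2.2)
          else ((a, b, c).1, (a, b, c).2.1 ++ [x], (a, b, c).2.2)) = (a, b, c ++ [x]) from by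
            simp [hs], ih]
      simp [hs]
    · by_cases hq : q x = true
      · rw [show (if s x then ((a, b, c).1, (a, b, c).2.1, (a, b, c).2.2 ++ [x])
            else if q x then ((a, b, c).1 ++ [x], (a, b, c).2.1, (a, b, c).2.2)
            else ((a, b, c).1, (a, b, c).2.1 ++ [x], (a, b, c).2.2)) = (a ++ [x], b, c) from by
              simp [hs, hq], ih]
        simp [hs, hq]
      · rw [show (if s x then ((a, b, c).1, (a, b, c).2.1, (a, b, c).2.2 ++ [x])
            else if q x then ((a, b, c).1 ++ [x], (a, b, c).2.1, (a, b, c).2.2)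
            else ((a, b, c).1, (a, b, c).2.1 ++ [x], (a, b, c).2.2)) = (a, b ++ [x], c) from by
              simp [hs, hq], ih]
        simp [hs, Bool.eq_false_iff.mpr hq]

-- sorting a filtered distinct list = filtering the sorted distinct list
theorem pvSortedFilterOfList (xs : List Int) (p : Int → Bool) :
    PySem.List.sorted ((PySem.Set.ofList xs).filter p) (fun x => x) false
      = (PySem.List.sorted (PySem.Set.ofList xs) (fun x => x) false).filter p := by
  apply PySem.List.sorted_eq_of_perm_of_pairwise_lt
  · exact ((PySem.List.sorted_perm (PySem.Set.ofList xs) (fun x => x) false).filter p)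
  · exact (PySem.List.sorted_ofList_pairwise_lt xs).filter p

-- every element of the sorted distinct list is at most its last element (= Source B's m)
theorem pvMemLeLast (u : List Int) (hu : u.Pairwise (· < ·)) (x : Int) (hx : x ∈ u) :
    x ≤ (match PySem.List.pyGet? u (-1) with | some y => y | none => 1) := by
  rcases List.eq_nil_or_concat' u with rfl | ⟨s, y, rfl⟩
  · cases hx
  · rw [PySem.List.pyGet?_neg_one_append_singleton s y]
    have hred : (match (some y : Option Int) with | some z => z | none => 1) = y := rfl
    rw [hred]
    rcases List.mem_append.mp hx with hxs | hxy
    · have hlt := (List.pairwise_append.mp hu).2.2 x hxs y (by simp)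
      omega
    · simp only [List.mem_singleton] at hxy; omega

-- ===== VERDICT (by name: the statement is the Claim_ definition above) =====
theorem categorize_numbers_spec : Claim_equal_categorize_numbers := by
  intro numbers _
  unfold Spec_categorize_numbers categorize_numbers categorize_numbers_alt
  rw [pvFoldlClassify]
  simp only [List.nil_append]
  rw [pvSortedFilterOfList, pvSortedFilterOfList, pvSortedFilterOfList]
  have hpw := PySem.List.sorted_ofList_pairwise_lt numbers
  refine Prod.ext ?_ (Prod.ext ?_ ?_) <;>
    · apply List.filter_congr
      intro n hn
      have hle := pvMemLeLast _ hpw n hn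
      by_cases h2 : 2 ≤ n
      · try rw [pvTblTest_eq _ n h2 hle]
        simp [show (1:Int) < n by omega, show (0:Int) ≤ n by omega, show ¬ n ≤ 1 by omega,
          show n ≠ 0 by omega, show n ≠ 1 by omega, h2]
      · have hA : pvIsPrimeA n = false := by
          unfold pvIsPrimeA; rw [if_pos (by omega : n < 2)]
        by_cases h0 : 0 ≤ n
        · rcases (by omega : n = 0 ∨ n = 1) with rfl | rfl <;> simp [hA]
        · simp [hA, show ¬ (1:Int) < n by omega, show ¬ (0:Int) ≤ n from h0,
            show n ≠ 0 by omega, show n ≠ 1 by omega, show ¬ (2:Int) ≤ n from h2]
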